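-- pv_equiv track=rewrite | github.com/jjsong13/dataStructure | findMax2_2.py | getMax2
-- ===== SOURCE A (Python) =====
-- def getMax2(n, myMatrix):
--     # '''
--     # 크기 n x n 의 행렬 myMatrix내의 원소의 합, 최댓값, 두 번째 최댓값을 반환하는 함수.
--     #
--     # 만약 myMatrix = [[1, 2, 3], [2, 3, 4], [3, 3, 4]]라면 (25, 4, 3) 을 반환한다.
--     # '''
--
--     mySum = 0
--     myMax = 0
--     myMax2 = 0
--
--
--     count = 0
--
--     for i in range(n):
--         for j in range(n):
--             mySum = mySum + myMatrix[i][j]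
--             count += 1
--             if myMatrix[i][j] > myMax2 :
--                 if myMatrix[i][j] > myMax :
--                     myMax, myMax2 = myMatrix[i][j], myMax
--                 elif myMatrix[i][j] == myMax :
--                     pass
--                 else :
--                     myMax2 = myMatrix[i][j]
--     if count < 2:
--         myMax2 = 0
--
--     return (mySum, myMax, myMax2)
-- ===== SOURCE B (Python) =====
-- def getMax2(n, myMatrix):
--     # Three separate aggregate passes over the flattened n*n values instead of
--     # A's single incremental state-machine pass.
--     flat = [myMatrix[i][j] for i in range(n) for j in range(n)]
--     mySum = sum(flat)
--     myMax = max([0] + flat)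
--     myMax2 = max([0] + [v for v in flat if v < myMax])
--     return (mySum, myMax, myMax2)
-- ===== Notes on version B (the rewrite author's own statement) =====
-- stated objective: simpler
-- what changed: Replaces the single incremental pass maintaining (sum, max, max2, count) with a flatten-then-aggregate decomposition: sum, 0-floored max, and 0-floored max of values strictly below the max, each as its own pass; the count<2 reset is dropped as it is provably a no-op.
import Mathlib
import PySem

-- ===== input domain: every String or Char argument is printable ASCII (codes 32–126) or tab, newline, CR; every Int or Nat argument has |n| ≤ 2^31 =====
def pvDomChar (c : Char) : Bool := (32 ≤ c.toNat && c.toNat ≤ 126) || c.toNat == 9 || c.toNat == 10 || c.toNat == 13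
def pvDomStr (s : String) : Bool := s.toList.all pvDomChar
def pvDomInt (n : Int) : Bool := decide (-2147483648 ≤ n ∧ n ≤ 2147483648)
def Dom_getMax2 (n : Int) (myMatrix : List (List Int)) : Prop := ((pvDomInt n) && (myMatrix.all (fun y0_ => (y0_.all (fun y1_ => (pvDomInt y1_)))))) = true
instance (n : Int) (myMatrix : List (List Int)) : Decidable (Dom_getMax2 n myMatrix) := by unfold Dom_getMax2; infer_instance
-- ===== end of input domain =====

-- B replaces A's single incremental pass (state machine over sum/max/max2/count)
-- by a flatten-then-aggregate decomposition: three separate passes. Objective: simpler.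

-- ===== PORT A =====
-- state = (mySum, myMax, myMax2, count), in the Python order
def getMax2 (n : Int) (myMatrix : List (List Int)) : Int × Int × Int :=
  let r := PySem.List.pyRange 0 n 1
  let st :=
    r.foldl (fun st i =>
      r.foldl (fun (st : Int × Int × Int × Int) j =>
        -- myMatrix[i][j]; the getD defaults are never reached under Pre_getMax2
        let v := PySem.List.pyGetD (PySem.List.pyGetD myMatrix i []) j 0
        let mySum := st.1 + v
        let count := st.2.2.2 + 1
        if v > st.2.2.1 then
          if v > st.2.1 then (mySum, v, st.2.1, count)
          else if v = st.2.1 then (mySum, st.2.1, st.2.2.1, count)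
          else (mySum, st.2.1, v, count)
        else (mySum, st.2.1, st.2.2.1, count)) st)
      ((0, 0, 0, 0) : Int × Int × Int × Int)
  let myMax2 := if st.2.2.2 < 2 then 0 else st.2.2.1
  (st.1, st.2.1, myMax2)

-- ===== PORT B =====
def getMax2_alt (n : Int) (myMatrix : List (List Int)) : Int × Int × Int :=
  let r := PySem.List.pyRange 0 n 1
  let flat := r.flatMap (fun i => r.map (fun j =>
    PySem.List.pyGetD (PySem.List.pyGetD myMatrix i []) j 0))
  let mySum := flat.sum
  let myMax := flat.foldl max 0                                  -- max([0] + flat)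
  let myMax2 := (flat.filter (fun v => v < myMax)).foldl max 0   -- max([0] + [v < myMax])
  (mySum, myMax, myMax2)

-- ===== PRECONDITION & SPEC =====
-- Exactly the inputs where A's indexing never raises IndexError: the first n rows
-- exist and each has at least n entries (vacuously true for n ≤ 0).
def Pre_getMax2 (n : Int) (myMatrix : List (List Int)) : Prop :=
  n ≤ (myMatrix.length : Int) ∧ ∀ row ∈ myMatrix.take n.toNat, n ≤ (row.length : Int)
instance (n : Int) (myMatrix : List (List Int)) : Decidable (Pre_getMax2 n myMatrix) := by
  unfold Pre_getMax2; infer_instance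
def pvWitness_getMax2 : Int × List (List Int) := (2, [[1, 5], [5, 3]])

def Spec_getMax2 (n : Int) (myMatrix : List (List Int)) (out : Int × Int × Int) : Prop := out = getMax2_alt n myMatrix
instance (n : Int) (myMatrix : List (List Int)) (out : Int × Int × Int) : Decidable (Spec_getMax2 n myMatrix out) := by unfold Spec_getMax2; infer_instance

-- ===== CLAIM (what is proved, stated in full; the proofs are below) =====
def Claim_equal_getMax2 : Prop := ∀ (n : Int) (myMatrix : List (List Int)), Dom_getMax2 n myMatrix → Pre_getMax2 n myMatrix → Spec_getMax2 n myMatrix (getMax2 n myMatrix)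

-- ===== LEMMAS AND PROOFS =====

-- A's loop body, abstracted over the incoming value
def pvStep (st : Int × Int × Int × Int) (v : Int) : Int × Int × Int × Int :=
  let mySum := st.1 + v
  let count := st.2.2.2 + 1
  if v > st.2.2.1 then
    if v > st.2.1 then (mySum, v, st.2.1, count)
    else if v = st.2.1 then (mySum, st.2.1, st.2.2.1, count)
    else (mySum, st.2.1, v, count)
  else (mySum, st.2.1, st.2.2.1, count)

-- closed forms for the aggregates B computes
def pvMax (L : List Int) : Int := L.foldl max 0
def pvMax2 (L : List Int) : Int := (L.filter (fun v => v < pvMax L)).foldl max 0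

lemma pvMax_nonneg (L : List Int) : 0 ≤ pvMax L := (PySem.List.le_foldl_max L 0).1

lemma pvMax_isMax (L : List Int) : ∀ x ∈ L, x ≤ pvMax L := (PySem.List.le_foldl_max L 0).2

lemma pvMax2_le (L : List Int) : pvMax2 L ≤ pvMax L := by
  unfold pvMax2
  rcases PySem.List.foldl_max_mem (L.filter (fun v => v < pvMax L)) 0 with h | h
  · rw [h]; exact pvMax_nonneg L
  · have hm := List.of_mem_filter h
    simp only [decide_eq_true_eq] at hm
    omega

lemma pvMax_append (L : List Int) (v : Int) : pvMax (L ++ [v]) = max (pvMax L) v := by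
  simp [pvMax, List.foldl_append]

lemma pvMax2_append_le (L : List Int) (v : Int) (h : v ≤ pvMax L) :
    pvMax2 (L ++ [v]) = if v < pvMax L then max (pvMax2 L) v else pvMax2 L := by
  unfold pvMax2
  rw [pvMax_append]
  have hm : max (pvMax L) v = pvMax L := by omega
  rw [hm, List.filter_append]
  by_cases hv : v < pvMax L
  · simp [hv, List.foldl_append]
  · simp [hv]

lemma pvMax2_append_gt (L : List Int) (v : Int) (h : pvMax L < v) :
    pvMax2 (L ++ [v]) = pvMax L := by
  unfold pvMax2
  rw [pvMax_append]
  have hm : max (pvMax L) v = v := by omega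
  rw [hm, List.filter_append]
  have hfl : L.filter (fun x => x < v) = L := by
    apply List.filter_eq_self.2
    intro x hx
    have := pvMax_isMax L x hx
    simp only [decide_eq_true_eq]
    omega
  have hfv : List.filter (fun x => x < v) [v] = ([] : List Int) := by simp
  rw [hfl, hfv, List.append_nil]
  rfl

-- A's nested index loops are a fold of the loop body over the flattened value list
lemma pvFoldl_nested (outer inner : List Int) (f : Int → Int → Int) (s : Int × Int × Int × Int) :
    outer.foldl (fun st i => inner.foldl (fun st j => pvStep st (f i j)) st) s
      = (outer.flatMap (fun i => inner.map (f i))).foldl pvStep s := by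
  induction outer generalizing s with
  | nil => simp
  | cons i t ih => simp [List.foldl_append, List.foldl_map, ih]

-- the running-state characterisation of A's loop
lemma pvStep_foldl (L : List Int) :
    L.foldl pvStep (0, 0, 0, 0) = (L.sum, pvMax L, pvMax2 L, (L.length : Int)) := by
  induction L using List.reverseRecOn with
  | nil => simp [pvMax, pvMax2]
  | append_singleton L v ih =>
    rw [List.foldl_append, List.foldl_cons, List.foldl_nil, ih]
    have hM0 := pvMax_nonneg L
    have hM2 := pvMax2_le L
    unfold pvStep
    simp only [List.sum_append, List.length_append, List.sum_cons, List.sum_nil,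
      List.length_cons, List.length_nil]
    rw [pvMax_append]
    rcases lt_trichotomy (pvMax L) v with hgt | heq | hlt
    · rw [pvMax2_append_gt L v hgt]
      have h2 : pvMax2 L < v := by omega
      simp only [gt_iff_lt, if_pos h2, if_pos hgt]
      have hmx : max (pvMax L) v = v := by omega
      rw [hmx]
      simp only [Prod.mk.injEq]
      push_cast
      and_intros <;> first | trivial | omega
    · rw [pvMax2_append_le L v (le_of_eq heq.symm)]
      have hnf : ¬ v < pvMax L := by omega
      have hngt : ¬ pvMax L < v := by omega
      rw [if_neg hnf]
      by_cases h2 : pvMax2 L < v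
      · simp only [gt_iff_lt, if_pos h2, if_neg hngt, if_pos heq.symm]
        simp only [Prod.mk.injEq]
        push_cast
        and_intros <;> first | trivial | omega
      · simp only [gt_iff_lt, if_neg h2]
        simp only [Prod.mk.injEq]
        push_cast
        and_intros <;> first | trivial | omega
    · rw [pvMax2_append_le L v (le_of_lt hlt)]
      rw [if_pos hlt]
      have hngt : ¬ pvMax L < v := by omega
      have hne : v ≠ pvMax L := by omega
      have hmx : max (pvMax L) v = pvMax L := by omega
      rw [hmx]
      by_cases h2 : pvMax2 L < v
      · have hm2 : max (pvMax2 L) v = v := by omega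
        rw [hm2]
        simp only [gt_iff_lt, if_pos h2, if_neg hngt, if_neg hne]
        simp only [Prod.mk.injEq]
        push_cast
        and_intros <;> first | trivial | omega
      · have hm2 : max (pvMax2 L) v = pvMax2 L := by omega
        rw [hm2]
        simp only [gt_iff_lt, if_neg h2]
        simp only [Prod.mk.injEq]
        push_cast
        and_intros <;> first | trivial | omega

-- with fewer than two values, the second max is 0 anyway (A's count<2 reset is a no-op)
lemma pvMax2_short (L : List Int) (h : L.length < 2) : pvMax2 L = 0 := by
  match L, h with
  | [], _ => simp [pvMax2]
  | [v], _ =>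
    unfold pvMax2 pvMax
    by_cases hv : 0 ≤ v
    · have h1 : max 0 v = v := by omega
      simp [h1]
    · have h1 : max 0 v = 0 := by omega
      simp [h1, show v < 0 by omega]

-- ===== VERDICT (by name: the statement is the Claim_ definition above) =====
theorem getMax2_spec : Claim_equal_getMax2 := by
  intro n myMatrix _ _
  unfold Spec_getMax2
  show getMax2 n myMatrix = getMax2_alt n myMatrix
  have hA : getMax2 n myMatrix =
      (let flat := (PySem.List.pyRange 0 n 1).flatMap (fun i => (PySem.List.pyRange 0 n 1).map
          (fun j => PySem.List.pyGetD (PySem.List.pyGetD myMatrix i []) j 0));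
       (flat.sum, pvMax flat, if (flat.length : Int) < 2 then 0 else pvMax2 flat)) := by
    show (let st := (PySem.List.pyRange 0 n 1).foldl (fun st i =>
          (PySem.List.pyRange 0 n 1).foldl (fun (st : Int × Int × Int × Int) j =>
            pvStep st (PySem.List.pyGetD (PySem.List.pyGetD myMatrix i []) j 0)) st) (0, 0, 0, 0);
        (st.1, st.2.1, if st.2.2.2 < 2 then 0 else st.2.2.1)) = _
    rw [pvFoldl_nested, pvStep_foldl]
  have hB : getMax2_alt n myMatrix =
      (let flat := (PySem.List.pyRange 0 n 1).flatMap (fun i => (PySem.List.pyRange 0 n 1).map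
          (fun j => PySem.List.pyGetD (PySem.List.pyGetD myMatrix i []) j 0));
       (flat.sum, pvMax flat, pvMax2 flat)) := rfl
  rw [hA, hB]
  simp only []
  by_cases hlen : (((PySem.List.pyRange 0 n 1).flatMap (fun i => (PySem.List.pyRange 0 n 1).map
      (fun j => PySem.List.pyGetD (PySem.List.pyGetD myMatrix i []) j 0))).length : Int) < 2
  · rw [if_pos hlen, pvMax2_short _ (by exact_mod_cast hlen)]
  · rw [if_neg hlen]
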